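-- pv_equiv track=rewrite | github.com/marbybr/nuclei_cell_segmentation | cell_segmentation/image_to_grid.py | find_minimal_cycles
-- ===== SOURCE A (Python) =====
-- def find_cycles(graph, start, node, visited, path, cycles):
--     """
--     Recursive function to find all cycles starting and ending at a specific node.
--
--     Args:
--         graph (dict): Adjacency list representation of the graph.
--         start (any): The starting node of the cycle.
--         node (any): The current node being visited.
--         visited (set): Set of visited nodes to prevent revisiting.
--         path (list): Current path being traversed.
--         cycles (list): List of detected cycles.
--
--     Returns:
--         None. Adds cycles to the `cycles` list.
--     """
--     # Mark the current node as visited and add it to the path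
--     visited.add(node)
--     path.append(node)
--
--     # Traverse all neighbors of the current node
--     for neighbor in graph[node]:
--         if neighbor == start:
--             # A cycle is found if the neighbor is the start node
--             cycles.append(path[:] + [start])  # Add a copy of the path to the cycles
--         elif neighbor not in visited:
--             # Continue exploring the neighbor
--             find_cycles(graph, start, neighbor, visited, path, cycles)
--
--     # Backtrack: remove the current node from visited and path
--     visited.remove(node)
--     path.pop()
--
-- def find_minimal_cycles(vertices, edges):
--     """
--     Finds all minimal cycles in a directed graph.
--
--     Args:
--         vertices (list): List of vertices in the graph.
--         edges (list): List of edges in the graph, where each edge is a tuple (u, v).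
--
--     Returns:
--         list: A list of minimal cycles, where each cycle is represented as a list of nodes.
--     """
--     # Build the graph as an adjacency list
--     graph = {vertex: [] for vertex in vertices}
--
--     for edge in edges:
--         u, v = edge
--         graph[u].append(v)  # Add the edge to the graph
--
--     # List to store all detected cycles
--     cycles = []
--     for vertex in graph:
--         visited = set()  # Track visited nodes for each starting vertex
--         path = []  # Track the current traversal path
--         find_cycles(graph, vertex, vertex, visited, path, cycles)
--
--     # Filter out minimal cycles
--     minimal_cycles = []
--     for cycle in cycles:
--         is_minimal = True
--         for other_cycle in cycles:
--             # A cycle is not minimal if it's a subset of another cycle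
--             if cycle != other_cycle and set(cycle).issubset(other_cycle):
--                 is_minimal = False
--                 break
--         if is_minimal:
--             minimal_cycles.append(cycle)
--
--     return minimal_cycles
-- ===== SOURCE B (Python) =====
-- def find_minimal_cycles(vertices, edges):
--     # Iterative rewrite: the recursion is replaced by an explicit work stack of
--     # path prefixes.  Each stack item carries its whole path, so there is no
--     # visited set, no backtracking and no shared mutable traversal state: an
--     # item ending in the start vertex (beyond position 0) IS a completed cycle;
--     # any other item is expanded into its admissible one-step extensions, which
--     # are pushed in reverse so the stack pops them in neighbor order —
--     # reproducing the recursion's depth-first preorder exactly.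
--     adj = {v: [] for v in vertices}
--     for u, w in edges:
--         adj[u].append(w)
--
--     cycles = []
--     for start in adj:
--         stack = [[start]]
--         while stack:
--             path = stack.pop()
--             if len(path) > 1 and path[-1] == start:
--                 cycles.append(path)
--                 continue
--             items = []
--             for nb in adj[path[-1]]:
--                 if nb == start or nb not in path:
--                     items.append(path + [nb])
--             stack.extend(reversed(items))
--
--     return [c for c in cycles
--             if not any(o != c and set(c).issubset(o) for o in cycles)]
-- ===== Notes on version B (the rewrite author's own statement) =====
-- stated objective: alternative
-- what changed: Replaces the recursive DFS with shared mutable visited/path/cycles state by an iterative worklist: an explicit stack of self-contained path prefixes (no visited set, no backtracking; completed cycles are themselves stack items, extensions are pushed in reverse), and the nested break loop for minimality by a filter comprehension with any().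
import Mathlib
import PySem

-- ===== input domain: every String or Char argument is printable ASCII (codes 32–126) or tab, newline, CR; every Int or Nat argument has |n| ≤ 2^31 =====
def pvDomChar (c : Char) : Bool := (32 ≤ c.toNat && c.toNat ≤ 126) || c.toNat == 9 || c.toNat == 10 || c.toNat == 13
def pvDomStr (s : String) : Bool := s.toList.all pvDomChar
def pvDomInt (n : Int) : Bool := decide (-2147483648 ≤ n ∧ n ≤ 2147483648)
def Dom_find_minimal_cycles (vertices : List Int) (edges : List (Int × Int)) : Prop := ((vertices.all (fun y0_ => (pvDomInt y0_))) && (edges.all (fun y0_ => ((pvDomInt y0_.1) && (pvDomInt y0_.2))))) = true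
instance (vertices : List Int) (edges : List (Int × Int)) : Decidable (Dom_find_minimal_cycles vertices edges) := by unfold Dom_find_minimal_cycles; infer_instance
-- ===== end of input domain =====

-- B replaces A's recursive DFS (shared mutable visited set / path / cycles, backtracking)
-- by an iterative worklist of self-contained path prefixes, and A's break loop for
-- minimality by a filter with any(); same values, similar cost.

-- Termination helper cited by the ports' decreasing_by: entering an unvisited
-- vertex strictly shrinks the set of vertices not yet on the path.
theorem pvUnseenDecAux (l xs : List Int) (nb : Int) (h1 : nb ∈ l) (h2 : nb ∉ xs) :
    (l.filter (fun v => !(xs.contains v || v == nb))).length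
      < (l.filter (fun v => !(xs.contains v))).length := by
  induction l with
  | nil => cases h1
  | cons a t ih =>
    by_cases hanb : a = nb
    · subst hanb
      have hle : (t.filter (fun v => !(xs.contains v || v == a))).length
          ≤ (t.filter (fun v => !(xs.contains v))).length :=
        (List.monotone_filter_right t (by
          intro v hv
          simp only [Bool.not_or, Bool.and_eq_true] at hv
          exact hv.1)).length_le
      have hca : xs.contains a = false := by
        simpa using h2
      simp only [List.filter_cons, hca, BEq.rfl, Bool.or_true, Bool.not_true,
        Bool.not_false]
      exact Nat.lt_succ_of_le hle
    · have h1' : nb ∈ t := by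
        cases h1 with
        | head => exact absurd rfl hanb
        | tail _ h => exact h
      have hne : (a == nb) = false := by simp [hanb]
      by_cases hax : a ∈ xs
      · have hca : xs.contains a = true := by simpa using hax
        simp only [List.filter_cons, hca, hne, Bool.true_or, Bool.not_true]
        exact ih h1'
      · have hca : xs.contains a = false := by simpa using hax
        simp only [List.filter_cons, hca, hne, Bool.or_false, Bool.not_false]
        exact Nat.succ_lt_succ (ih h1')

theorem pvUnseenDec (l xs : List Int) (nb : Int) (h1 : nb ∈ l) (h2 : nb ∉ xs) :
    (l.filter (fun v => !((xs ++ [nb]).contains v))).length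
      < (l.filter (fun v => !(xs.contains v))).length := by
  have hp : (fun v : Int => !((xs ++ [nb]).contains v))
      = fun v => !(xs.contains v || v == nb) := by
    funext v
    by_cases hm : v ∈ xs <;> by_cases he : v = nb <;> simp [hm, he]
  rw [hp]
  exact pvUnseenDecAux l xs nb h1 h2

-- ===== PORT A =====
-- graph = {v: [] for v in vertices}; for (u, v) in edges: graph[u].append(v)
def pvBuildGraphA (vertices : List Int) (edges : List (Int × Int)) : PySem.Dict Int (List Int) :=
  let g := vertices.foldl (fun d v => d.insert v []) PySem.Dict.empty
  edges.foldl (fun d e => d.modify e.1 [] (fun l => l ++ [e.2])) g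

-- find_cycles' neighbor loop; the recursive find_cycles(graph, start, nb, …) call is inlined
-- (its body = mark nb, loop over graph[nb], unmark nb — state restoration is the identity in
-- this pure model, so only `cycles` is threaded).  The `nb ∈ vertices` conjunct is a totality
-- guard: where it fails Python raises KeyError on graph[nb] (outside Pre_).
def pvFindCyclesA (vertices : List Int) (graph : PySem.Dict Int (List Int)) (start : Int)
    (visited : PySem.Set Int) (path : List Int) (neighbors : List Int)
    (cycles : List (List Int)) : List (List Int) :=
  match neighbors with
  | [] => cycles
  | nb :: rest =>
    if nb = start then
      pvFindCyclesA vertices graph start visited path rest (cycles ++ [path ++ [start]])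
    else if h : nb ∉ visited ∧ nb ∈ vertices then
      -- h used in decreasing_by
      let cycles' := pvFindCyclesA vertices graph start (PySem.Set.add visited nb)
        (path ++ [nb]) (graph.getD nb []) cycles
      pvFindCyclesA vertices graph start visited path rest cycles'
    else
      pvFindCyclesA vertices graph start visited path rest cycles
termination_by ((vertices.filter (fun v => !(visited.contains v))).length, neighbors.length)
decreasing_by
  · exact Prod.Lex.right _ (Nat.lt_succ_self _)
  · apply Prod.Lex.left
    rw [PySem.Set.add_of_not_mem h.1]
    exact pvUnseenDec vertices visited nb h.2 h.1
  · exact Prod.Lex.right _ (Nat.lt_succ_self _)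
  · exact Prod.Lex.right _ (Nat.lt_succ_self _)

-- is_minimal inner loop with its break
def pvIsMinimalA (cycle : List Int) (others : List (List Int)) : Bool :=
  match others with
  | [] => true
  | o :: rest =>
    if (!(cycle == o)) && PySem.Set.issubset (PySem.Set.ofList cycle) o then false
    else pvIsMinimalA cycle rest

def find_minimal_cycles (vertices : List Int) (edges : List (Int × Int)) : List (List Int) :=
  let graph := pvBuildGraphA vertices edges
  let cycles := graph.keys.foldl (fun cycles vtx =>
    pvFindCyclesA vertices graph vtx (PySem.Set.add PySem.Set.empty vtx) [vtx]
      (graph.getD vtx []) cycles) []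
  cycles.foldl (fun acc c => if pvIsMinimalA c cycles then acc ++ [c] else acc) []

-- ===== PORT B =====
-- adj = {v: [] for v in vertices}; for (u, w) in edges: adj[u].append(w)
def pvBuildAdjB (vertices : List Int) (edges : List (Int × Int)) : PySem.Dict Int (List Int) :=
  let a := vertices.foldl (fun d v => d.insert v []) PySem.Dict.empty
  edges.foldl (fun d e => d.modify e.1 [] (fun l => l ++ [e.2])) a

-- push condition of the inner `for nb in adj[path[-1]]` loop; the `vertices.contains nb`
-- conjunct is a totality guard: where it fails, Python raises KeyError on adj[path[-1]]
-- when the pushed item is later expanded (outside Pre_).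
def pvPushB (vertices : List Int) (start : Int) (path : List Int) (nb : Int) : Bool :=
  nb == start || (!(path.contains nb) && vertices.contains nb)

-- items = []; for nb in adj[path[-1]]: if …: items.append(path + [nb])
def pvItemsB (vertices : List Int) (start : Int) (path : List Int) (nbs : List Int) :
    List (List Int) :=
  nbs.foldl (fun acc nb =>
    if pvPushB vertices start path nb then acc ++ [path ++ [nb]] else acc) []

theorem pvItemsB_eq (vertices : List Int) (start : Int) (path : List Int) (nbs : List Int) :
    pvItemsB vertices start path nbs
      = ((nbs.filter (pvPushB vertices start path)).map (fun nb => path ++ [nb])) := by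
  unfold pvItemsB
  rw [PySem.List.foldl_append_if]
  rfl

-- termination size for the worklist: number of simple extensions of `path` (over-counted)
def pvG (vertices : List Int) (adj : PySem.Dict Int (List Int)) (path : List Int)
    (nbs : List Int) : Nat :=
  match nbs with
  | [] => 1
  | nb :: rest =>
    if h : nb ∉ path ∧ nb ∈ vertices then
      -- h used in decreasing_by
      pvG vertices adj (path ++ [nb]) (adj.getD nb []) + pvG vertices adj path rest
    else pvG vertices adj path rest
termination_by ((vertices.filter (fun v => !(path.contains v))).length, nbs.length)
decreasing_by
  · exact Prod.Lex.left _ _ (pvUnseenDec vertices path nb h.2 h.1)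
  · exact Prod.Lex.right _ (Nat.lt_succ_self _)
  · exact Prod.Lex.right _ (Nat.lt_succ_self _)

-- weight of one stack item (0 for a completed-cycle item)
def pvWeightB (vertices : List Int) (adj : PySem.Dict Int (List Int)) (start : Int)
    (path : List Int) : Nat :=
  if 1 < path.length ∧ PySem.List.pyGetD path (-1) 0 = start then 0
  else pvG vertices adj path (adj.getD (PySem.List.pyGetD path (-1) 0) [])

theorem pvG_rest_le (vertices : List Int) (adj : PySem.Dict Int (List Int)) (path : List Int)
    (nb : Int) (rest : List Int) :
    pvG vertices adj path rest ≤ pvG vertices adj path (nb :: rest) := by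
  rw [pvG]
  split
  · exact Nat.le_add_left _ _
  · exact Nat.le_refl _

-- key bound cited by pvLoopB's decreasing_by: the pushed extensions weigh strictly
-- less than the expanded item
theorem pvItemsWeightLt (vertices : List Int) (adj : PySem.Dict Int (List Int)) (start : Int)
    (path : List Int) (hp : path ≠ []) (nbs : List Int) :
    ((pvItemsB vertices start path nbs).map (pvWeightB vertices adj start)).sum
      < pvG vertices adj path nbs := by
  rw [pvItemsB_eq]
  induction nbs with
  | nil => simp [pvG]
  | cons nb rest ih =>
    by_cases hpush : pvPushB vertices start path nb = true
    · rw [List.filter_cons_of_pos hpush, List.map_cons, List.map_cons, List.sum_cons]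
      by_cases hs : nb = start
      · have hw : pvWeightB vertices adj start (path ++ [nb]) = 0 := by
          rw [pvWeightB, if_pos]
          refine ⟨?_, ?_⟩
          · rcases List.exists_cons_of_ne_nil hp with ⟨a, t, ht⟩
            rw [ht]; simp
          · rw [PySem.List.pyGetD_neg_one_append_singleton]; exact hs
        rw [hw, Nat.zero_add]
        exact lt_of_lt_of_le ih (pvG_rest_le vertices adj path nb rest)
      · have hcond : nb ∉ path ∧ nb ∈ vertices := by
          unfold pvPushB at hpush
          have : (nb == start) = false := beq_eq_false_iff_ne.mpr hs
          simp [this] at hpush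
          exact hpush
        have hw : pvWeightB vertices adj start (path ++ [nb])
            = pvG vertices adj (path ++ [nb]) (adj.getD nb []) := by
          rw [pvWeightB, if_neg, PySem.List.pyGetD_neg_one_append_singleton]
          rw [PySem.List.pyGetD_neg_one_append_singleton]
          rintro ⟨-, h2⟩
          exact hs h2
        rw [hw, pvG, dif_pos hcond]
        exact Nat.add_lt_add_left ih _
    · rw [List.filter_cons_of_neg (by simpa using hpush)]
      exact lt_of_lt_of_le ih (pvG_rest_le vertices adj path nb rest)

-- the while loop: stack of path prefixes, top first (stack.pop() / stack.extend(reversed(items))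
-- become head / prepend); `hst` is a totality invariant (stack items are nonempty), used
-- only for termination.
def pvLoopB (vertices : List Int) (adj : PySem.Dict Int (List Int)) (start : Int)
    (stack : List (List Int)) (hst : ∀ P ∈ stack, P ≠ []) (cycles : List (List Int)) :
    List (List Int) :=
  match stack with
  | [] => cycles
  | path :: rest =>
    if 1 < path.length ∧ PySem.List.pyGetD path (-1) 0 = start then
      pvLoopB vertices adj start rest
        (fun P h => hst P (List.mem_cons_of_mem _ h)) (cycles ++ [path])
    else
      pvLoopB vertices adj start
        (pvItemsB vertices start path (adj.getD (PySem.List.pyGetD path (-1) 0) []) ++ rest)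
        (by
          intro P hP
          rcases List.mem_append.mp hP with hP | hP
          · rw [pvItemsB_eq] at hP
            rcases List.mem_map.mp hP with ⟨nb, -, rfl⟩
            simp
          · exact hst P (List.mem_cons_of_mem _ hP))
        cycles
termination_by (((stack.map (pvWeightB vertices adj start)).sum), stack.length)
decreasing_by
  · rename_i h
    have hw : pvWeightB vertices adj start path = 0 := by
      rw [pvWeightB, if_pos h]
    apply Prod.lex_def.mpr
    right
    constructor
    · simp [hw]
    · exact Nat.lt_succ_self _
  · rename_i h
    apply Prod.Lex.left
    rw [List.map_append, List.sum_append, List.map_cons, List.sum_cons]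
    have hw : pvWeightB vertices adj start path
        = pvG vertices adj path (adj.getD (PySem.List.pyGetD path (-1) 0) []) := by
      rw [pvWeightB, if_neg h]
    rw [hw]
    exact Nat.add_lt_add_right
      (pvItemsWeightLt vertices adj start path (hst path (List.mem_cons_self)) _) _

def find_minimal_cycles_alt (vertices : List Int) (edges : List (Int × Int)) :
    List (List Int) :=
  let adj := pvBuildAdjB vertices edges
  let cycles := adj.keys.foldl (fun cycles start =>
    pvLoopB vertices adj start [[start]] (by simp) cycles) []
  cycles.filter (fun c =>
    !(cycles.any (fun o => (!(o == c)) && PySem.Set.issubset (PySem.Set.ofList c) o)))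

-- ===== PRECONDITION & SPEC =====
-- Pre_: every edge endpoint is a vertex; otherwise Python A raises KeyError (a source at
-- graph-build time, a target when the DFS enters it), and so does Python B.
def Pre_find_minimal_cycles (vertices : List Int) (edges : List (Int × Int)) : Prop :=
  ∀ e ∈ edges, e.1 ∈ vertices ∧ e.2 ∈ vertices
instance (vertices : List Int) (edges : List (Int × Int)) : Decidable (Pre_find_minimal_cycles vertices edges) := by unfold Pre_find_minimal_cycles; infer_instance

def pvWitness_find_minimal_cycles : List Int × (List (Int × Int)) := ([1, 2], [(1, 2), (2, 1)])

def Spec_find_minimal_cycles (vertices : List Int) (edges : List (Int × Int)) (out : List (List Int)) : Prop := out = find_minimal_cycles_alt vertices edges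
instance (vertices : List Int) (edges : List (Int × Int)) (out : List (List Int)) : Decidable (Spec_find_minimal_cycles vertices edges out) := by unfold Spec_find_minimal_cycles; infer_instance

-- ===== CLAIM (what is proved, stated in full; the proofs are below) =====
def Claim_equal_find_minimal_cycles : Prop := ∀ (vertices : List Int) (edges : List (Int × Int)), Dom_find_minimal_cycles vertices edges → Pre_find_minimal_cycles vertices edges → Spec_find_minimal_cycles vertices edges (find_minimal_cycles vertices edges)

-- ===== LEMMAS AND PROOFS =====

-- proof-side pure description of the cycle enumeration both traversals perform
def pvCF (vertices : List Int) (adj : PySem.Dict Int (List Int)) (start : Int)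
    (path : List Int) (nbs : List Int) : List (List Int) :=
  match nbs with
  | [] => []
  | nb :: rest =>
    if nb = start then
      (path ++ [start]) :: pvCF vertices adj start path rest
    else if h : nb ∉ path ∧ nb ∈ vertices then
      -- h used in decreasing_by
      pvCF vertices adj start (path ++ [nb]) (adj.getD nb [])
        ++ pvCF vertices adj start path rest
    else
      pvCF vertices adj start path rest
termination_by ((vertices.filter (fun v => !(path.contains v))).length, nbs.length)
decreasing_by
  · exact Prod.Lex.right _ (Nat.lt_succ_self _)
  · exact Prod.Lex.left _ _ (pvUnseenDec vertices path nb h.2 h.1)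
  · exact Prod.Lex.right _ (Nat.lt_succ_self _)
  · exact Prod.Lex.right _ (Nat.lt_succ_self _)

-- what one stack item contributes
def pvItemC (vertices : List Int) (adj : PySem.Dict Int (List Int)) (start : Int)
    (path : List Int) : List (List Int) :=
  if 1 < path.length ∧ PySem.List.pyGetD path (-1) 0 = start then [path]
  else pvCF vertices adj start path (adj.getD (PySem.List.pyGetD path (-1) 0) [])

-- the two builds are the same dict
theorem pvBuildEq (vertices : List Int) (edges : List (Int × Int)) :
    pvBuildGraphA vertices edges = pvBuildAdjB vertices edges := rfl

-- A-side simulation: the accumulator recursion equals `cycles ++` the pure enumeration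
theorem pvLoopEqA (vertices : List Int) (graph : PySem.Dict Int (List Int)) (start : Int)
    (visited : PySem.Set Int) (path : List Int) (neighbors : List Int) (cycles : List (List Int))
    (hvp : ∀ x : Int, x ∈ visited ↔ x ∈ path) :
    pvFindCyclesA vertices graph start visited path neighbors cycles
      = cycles ++ pvCF vertices graph start path neighbors := by
  revert hvp
  refine pvFindCyclesA.induct vertices graph start
    (motive := fun visited path neighbors cycles =>
      (∀ x : Int, x ∈ visited ↔ x ∈ path) →
      pvFindCyclesA vertices graph start visited path neighbors cycles
        = cycles ++ pvCF vertices graph start path neighbors)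
    ?_ ?_ ?_ ?_ visited path neighbors cycles
  · intro visited path cycles hvp
    simp [pvFindCyclesA, pvCF]
  · intro visited path cycles rest ih hvp
    conv_lhs => rw [pvFindCyclesA]
    rw [if_pos rfl, ih hvp]
    conv_rhs => rw [pvCF]
    rw [if_pos rfl]
    simp [List.append_assoc]
  · intro visited path cycles nb rest hnb h cyc ih1 ih2 hvp
    have hvp' : ∀ x : Int, x ∈ PySem.Set.add visited nb ↔ x ∈ path ++ [nb] := by
      intro x
      rw [PySem.Set.mem_add]
      simp [hvp x]
    have hnbp : nb ∉ path := fun hp => h.1 ((hvp nb).mpr hp)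
    have hcyc : cyc = pvFindCyclesA vertices graph start (visited.add nb)
        (path ++ [nb]) (graph.getD nb []) cycles := rfl
    rw [hcyc] at ih2
    conv_lhs => rw [pvFindCyclesA]
    simp only [if_neg hnb, dif_pos h]
    rw [ih2 hvp, ih1 hvp']
    conv_rhs => rw [pvCF]
    rw [if_neg hnb, dif_pos (And.intro hnbp h.2)]
    simp [List.append_assoc]
  · intro visited path cycles nb rest hnb hnot ih hvp
    have hB : ¬ (nb ∉ path ∧ nb ∈ vertices) :=
      fun hc => hnot ⟨fun hv => hc.1 ((hvp nb).mp hv), hc.2⟩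
    conv_lhs => rw [pvFindCyclesA]
    rw [if_neg hnb, dif_neg hnot, ih hvp]
    conv_rhs => rw [pvCF]
    rw [if_neg hnb, dif_neg hB]

-- expanding a nonempty item yields exactly its pure enumeration, item by item
theorem pvItemsContrib (vertices : List Int) (adj : PySem.Dict Int (List Int)) (start : Int)
    (path : List Int) (hp : path ≠ []) (nbs : List Int) :
    (pvItemsB vertices start path nbs).flatMap (pvItemC vertices adj start)
      = pvCF vertices adj start path nbs := by
  rw [pvItemsB_eq]
  induction nbs with
  | nil => simp [pvCF]
  | cons nb rest ih =>
    by_cases hs : nb = start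
    · have hpush : pvPushB vertices start path nb = true := by
        simp [pvPushB, hs]
      rw [List.filter_cons_of_pos hpush, List.map_cons, List.flatMap_cons]
      have hitem : pvItemC vertices adj start (path ++ [nb]) = [path ++ [nb]] := by
        rw [pvItemC, if_pos]
        refine ⟨?_, ?_⟩
        · rcases List.exists_cons_of_ne_nil hp with ⟨a, t, ht⟩
          rw [ht]; simp
        · rw [PySem.List.pyGetD_neg_one_append_singleton]; exact hs
      rw [hitem, ih]
      conv_rhs => rw [pvCF]
      rw [if_pos hs, hs]
      rfl
    · by_cases hcond : nb ∉ path ∧ nb ∈ vertices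
      · have hpush : pvPushB vertices start path nb = true := by
          simp [pvPushB]
          exact Or.inr hcond
        rw [List.filter_cons_of_pos hpush, List.map_cons, List.flatMap_cons]
        have hitem : pvItemC vertices adj start (path ++ [nb])
            = pvCF vertices adj start (path ++ [nb]) (adj.getD nb []) := by
          rw [pvItemC, if_neg, PySem.List.pyGetD_neg_one_append_singleton]
          rw [PySem.List.pyGetD_neg_one_append_singleton]
          rintro ⟨-, h2⟩
          exact hs h2
        rw [hitem, ih]
        conv_rhs => rw [pvCF]
        rw [if_neg hs, dif_pos hcond]
      · have hpush : pvPushB vertices start path nb = false := by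
          have hb : (nb == start) = false := beq_eq_false_iff_ne.mpr hs
          by_cases hin : nb ∈ path
          · simp [pvPushB, hb]
            intro hq
            exact absurd hin hq
          · have hnv : nb ∉ vertices := fun hv => hcond ⟨hin, hv⟩
            simp [pvPushB, hb]
            intro _
            exact hnv
        rw [List.filter_cons_of_neg (by simp [hpush])]
        rw [ih]
        conv_rhs => rw [pvCF]
        rw [if_neg hs, dif_neg hcond]

-- B-side simulation: the worklist loop appends each item's contribution in order
theorem pvLoopEqB (vertices : List Int) (adj : PySem.Dict Int (List Int)) (start : Int)
    (stack : List (List Int)) (hst : ∀ P ∈ stack, P ≠ []) (cycles : List (List Int)) :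
    pvLoopB vertices adj start stack hst cycles
      = cycles ++ stack.flatMap (pvItemC vertices adj start) := by
  induction stack, hst, cycles using pvLoopB.induct vertices adj start with
  | case1 cycles hst _ => simp [pvLoopB]
  | case2 cycles path rest hst h _ ih =>
    conv_lhs => rw [pvLoopB]
    rw [if_pos h, ih]
    have hitem : pvItemC vertices adj start path = [path] := by
      rw [pvItemC, if_pos h]
    rw [List.flatMap_cons, hitem]
    simp [List.append_assoc]
  | case3 cycles path rest hst h hst2 ih =>
    conv_lhs => rw [pvLoopB]
    rw [if_neg h, ih]
    rw [List.flatMap_cons, List.flatMap_append]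
    rw [pvItemsContrib vertices adj start path (hst path List.mem_cons_self)]
    have hitem : pvItemC vertices adj start path
        = pvCF vertices adj start path (adj.getD (PySem.List.pyGetD path (-1) 0) []) := by
      rw [pvItemC, if_neg h]
    rw [hitem]

-- A's break loop is the negated any of B's filter
theorem pvIsMinimalEq (c : List Int) (l : List (List Int)) :
    pvIsMinimalA c l
      = !(l.any (fun o => (!(o == c)) && PySem.Set.issubset (PySem.Set.ofList c) o)) := by
  induction l with
  | nil => rfl
  | cons o rest ih =>
    rw [pvIsMinimalA]
    by_cases h : ((!(c == o)) && PySem.Set.issubset (PySem.Set.ofList c) o) = true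
    · have h' : ((!(o == c)) && PySem.Set.issubset (PySem.Set.ofList c) o) = true := by
        rcases Bool.and_eq_true_iff.mp h with ⟨h1, h2⟩
        have : (o == c) = false := by
          rw [beq_eq_false_iff_ne]
          intro he
          rw [he] at h1
          simp at h1
        simp [this, h2]
      rw [if_pos h, List.any_cons, h']
      simp
    · have h' : ((!(o == c)) && PySem.Set.issubset (PySem.Set.ofList c) o) = false := by
        rw [Bool.eq_false_iff]
        intro hc
        apply h
        rcases Bool.and_eq_true_iff.mp hc with ⟨h1, h2⟩
        have : (c == o) = false := by
          rw [beq_eq_false_iff_ne]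
          intro he
          rw [he] at h1
          simp at h1
        simp [this, h2]
      rw [if_neg h, List.any_cons, h', ih]
      simp

-- ===== VERDICT (by name: the statement is the Claim_ definition above) =====
theorem find_minimal_cycles_spec : Claim_equal_find_minimal_cycles := by
  intro vertices edges _ _hpre
  unfold Spec_find_minimal_cycles
  dsimp only [find_minimal_cycles, find_minimal_cycles_alt]
  rw [← pvBuildEq]
  set adj := pvBuildGraphA vertices edges with hadj
  have hcyc :
      adj.keys.foldl (fun cycles vtx =>
        pvFindCyclesA vertices adj vtx (PySem.Set.add PySem.Set.empty vtx) [vtx]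
          (adj.getD vtx []) cycles) []
      = adj.keys.foldl (fun cycles start =>
          pvLoopB vertices adj start [[start]] (by simp) cycles) [] := by
    apply PySem.List.foldl_congr_mem
    intro acc v hv
    rw [pvLoopEqB]
    have hitem : pvItemC vertices adj v [v]
        = pvCF vertices adj v [v] (adj.getD v []) := by
      rw [pvItemC, if_neg (by simp)]
      have : PySem.List.pyGetD [v] (-1) (0 : Int) = v := by
        rw [PySem.List.pyGetD_neg_one [v] 0 (by simp)]
        rfl
      rw [this]
    rw [List.flatMap_cons, List.flatMap_nil, List.append_nil, hitem]
    exact pvLoopEqA vertices adj v (PySem.Set.add PySem.Set.empty v) [v]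
      (adj.getD v []) acc (by
        intro x
        simp [PySem.Set.add, PySem.Set.empty, PySem.Set.contains])
  rw [hcyc]
  set cycles := adj.keys.foldl (fun cycles start =>
    pvLoopB vertices adj start [[start]] (by simp) cycles) [] with hc
  have hmin : ∀ acc, cycles.foldl
      (fun acc c => if pvIsMinimalA c cycles then acc ++ [c] else acc) acc
      = acc ++ cycles.filter (fun c =>
        !(cycles.any (fun o => (!(o == c)) && PySem.Set.issubset (PySem.Set.ofList c) o))) := by
    intro acc
    rw [PySem.List.foldl_congr_mem (g := fun acc c =>
      if (!(cycles.any (fun o => (!(o == c)) && PySem.Set.issubset (PySem.Set.ofList c) o))) = true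
      then acc ++ [c] else acc)]
    · exact PySem.List.foldl_append_if_eq_filter _ _ _
    · intro acc c _
      rw [pvIsMinimalEq]
  simpa using hmin []
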